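-- pv_equiv track=rewrite | github.com/traderromeo23/TemperatureTracker | weather_dashboard.py | cloud_penalty
-- ===== SOURCE A (Python) =====
-- def cloud_penalty(raw: str) -> int:
--     """0 = clear … 3 = overcast/BKN — how much cloud suppresses heating."""
--     if any(k in raw for k in ("OVC", "BKN")):
--         return 3
--     if "SCT" in raw:
--         return 2
--     if "FEW" in raw:
--         return 1
--     return 0
-- ===== SOURCE B (Python) =====
-- _CLOUD_LEVELS = {"OVC": 3, "BKN": 3, "SCT": 2, "FEW": 1}
--
-- def cloud_penalty(raw: str) -> int:
--     """0 = clear … 3 = overcast/BKN — how much cloud suppresses heating."""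
--     return max((lvl for k, lvl in _CLOUD_LEVELS.items() if k in raw), default=0)
-- ===== Notes on version B (the rewrite author's own statement) =====
-- stated objective: alternative
-- what changed: Replaced the priority-ordered early-return cascade with a keyword->level table whose matched levels are aggregated with max (default 0).
import Mathlib
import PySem

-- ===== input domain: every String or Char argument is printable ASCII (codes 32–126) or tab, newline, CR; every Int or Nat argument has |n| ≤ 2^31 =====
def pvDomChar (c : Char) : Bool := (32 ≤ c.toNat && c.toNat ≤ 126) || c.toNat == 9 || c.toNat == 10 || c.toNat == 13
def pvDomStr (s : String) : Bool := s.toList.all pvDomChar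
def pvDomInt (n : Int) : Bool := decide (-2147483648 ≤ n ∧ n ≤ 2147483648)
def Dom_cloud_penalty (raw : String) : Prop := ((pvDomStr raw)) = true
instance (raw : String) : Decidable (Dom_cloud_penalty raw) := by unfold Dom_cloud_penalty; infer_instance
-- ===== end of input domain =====

-- B replaces A's priority early-return cascade with a keyword->level table aggregated by max (alternative decomposition, same cost).

-- ===== PORT A =====
def cloud_penalty (raw : String) : Int :=
  if ["OVC", "BKN"].any (fun k => PySem.Str.isIn k raw) then 3
  else if PySem.Str.isIn "SCT" raw then 2
  else if PySem.Str.isIn "FEW" raw then 1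
  else 0

-- ===== PORT B =====
def cloud_penalty_alt (raw : String) : Int :=
  (([("OVC", (3 : Int)), ("BKN", 3), ("SCT", 2), ("FEW", 1)].filterMap
      (fun kv => if PySem.Str.isIn kv.1 raw then some kv.2 else none)).foldl max 0)

-- ===== PRECONDITION & SPEC =====
def Spec_cloud_penalty (raw : String) (out : Int) : Prop := out = cloud_penalty_alt raw
instance (raw : String) (out : Int) : Decidable (Spec_cloud_penalty raw out) := by unfold Spec_cloud_penalty; infer_instance

-- ===== CLAIM (what is proved, stated in full; the proofs are below) =====
def Claim_equal_cloud_penalty : Prop := ∀ (raw : String), Dom_cloud_penalty raw → Spec_cloud_penalty raw (cloud_penalty raw)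

-- ===== LEMMAS AND PROOFS =====

-- ===== VERDICT (by name: the statement is the Claim_ definition above) =====
theorem cloud_penalty_spec : Claim_equal_cloud_penalty := by
  intro raw _
  unfold Spec_cloud_penalty cloud_penalty cloud_penalty_alt
  cases hO : PySem.Str.isIn "OVC" raw <;> cases hB : PySem.Str.isIn "BKN" raw <;>
    cases hS : PySem.Str.isIn "SCT" raw <;> cases hF : PySem.Str.isIn "FEW" raw <;>
    simp at hO hB hS hF <;>
    simp [hO, hB, hS, hF, List.filterMap]
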